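-- pv_equiv track=rewrite | github.com/Krylov2310/module2hard | module2hard.py | gen_passwords
-- ===== SOURCE A (Python) =====
-- def gen_passwords(n):
--     result = ""
--     numb = (n + 1) // 2
--     for i in range(1, numb):
--         j = i + 1
--         while i + j <= n:
--             f = n % (i + j)
--             if f == 0:
--                 result += str(i) + str(j)
--             j = j + 1
--     return result
-- ===== SOURCE B (Python) =====
-- def gen_passwords(n):
--     numb = (n + 1) // 2
--     divs = [s for s in range(1, n + 1) if n % s == 0]
--     parts = []
--     for i in range(1, numb):
--         for s in divs:
--             if 2 * i < s:
--                 parts.append(str(i) + str(s - i))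
--     return "".join(parts)
-- ===== Notes on version B (the rewrite author's own statement) =====
-- stated objective: faster
-- what changed: B precomputes the divisor list of n once and, per i, emits pairs only from divisors s > 2i (with j = s - i), instead of A's inner while loop that tests every sum i+j up to n for every i.
import Mathlib
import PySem

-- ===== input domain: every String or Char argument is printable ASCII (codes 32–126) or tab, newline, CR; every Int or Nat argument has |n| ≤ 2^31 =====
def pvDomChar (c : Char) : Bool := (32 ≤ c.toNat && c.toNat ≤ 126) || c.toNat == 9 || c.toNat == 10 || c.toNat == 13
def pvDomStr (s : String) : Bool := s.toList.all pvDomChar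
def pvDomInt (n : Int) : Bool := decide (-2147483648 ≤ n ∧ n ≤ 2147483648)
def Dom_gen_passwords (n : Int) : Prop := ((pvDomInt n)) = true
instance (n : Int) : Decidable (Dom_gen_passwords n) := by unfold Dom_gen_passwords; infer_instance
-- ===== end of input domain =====

-- B replaces A's per-i while loop over all sums i+j ≤ n by one precomputed divisor list of n
-- scanned per i (objective: faster; a timing run measures the speed-up).

-- ===== PORT A =====
-- the 'while i + j <= n' loop of A, step for step
def pvWhileA (n i j : Int) (result : String) : String :=
  if i + j ≤ n then
    let f := PySem.Int.mod n (i + j)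
    pvWhileA n i (j + 1)
      (if f = 0 then result ++ PySem.Int.toStr i ++ PySem.Int.toStr j else result)
  else result
termination_by (n + 1 - i - j).toNat
decreasing_by omega

def gen_passwords (n : Int) : String :=
  let numb := PySem.Int.floordiv (n + 1) 2
  (PySem.List.pyRange 1 numb 1).foldl (fun result i => pvWhileA n i (i + 1) result) ""

-- ===== PORT B =====
def gen_passwords_alt (n : Int) : String :=
  let numb := PySem.Int.floordiv (n + 1) 2
  let divs := (PySem.List.pyRange 1 (n + 1) 1).filter (fun s => PySem.Int.mod n s == 0)
  let parts := (PySem.List.pyRange 1 numb 1).foldl (fun parts i =>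
      divs.foldl (fun parts s =>
        if 2 * i < s then parts ++ [PySem.Int.toStr i ++ PySem.Int.toStr (s - i)] else parts)
        parts) ([] : List String)
  PySem.Str.join "" parts

-- ===== PRECONDITION & SPEC =====
def Spec_gen_passwords (n : Int) (out : String) : Prop := out = gen_passwords_alt n
instance (n : Int) (out : String) : Decidable (Spec_gen_passwords n out) := by unfold Spec_gen_passwords; infer_instance

-- ===== CLAIM (what is proved, stated in full; the proofs are below) =====
def Claim_equal_gen_passwords : Prop := ∀ (n : Int), Dom_gen_passwords n → Spec_gen_passwords n (gen_passwords n)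

-- ===== LEMMAS AND PROOFS =====

-- the list of strings produced for a fixed i from the divisors of n lying in [t, n]
def pvTail (n i t : Int) : List String :=
  (((PySem.List.pyRange t (n + 1) 1).filter (fun s => PySem.Int.mod n s == 0)).map
    (fun s => PySem.Int.toStr i ++ PySem.Int.toStr (s - i)))

theorem pvJoin_nil : PySem.Str.join "" [] = "" := by
  simp [PySem.Str.join, PySem.Chars.join]; rfl

theorem pvJoin_cons (x : String) (l : List String) :
    PySem.Str.join "" (x :: l) = x ++ PySem.Str.join "" l := by
  apply String.toList_injective
  cases l <;> simp [PySem.Str.join, PySem.Chars.join, List.intercalate]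

theorem pvJoin_append (a b : List String) :
    PySem.Str.join "" (a ++ b) = PySem.Str.join "" a ++ PySem.Str.join "" b := by
  induction a with
  | nil => simp [pvJoin_nil]
  | cons x xs ih => simp [pvJoin_cons, ih, String.append_assoc]

-- peel one candidate sum off the front of pvTail
theorem pvTail_step (n i t : Int) (ht : t ≤ n) :
    pvTail n i t =
      (if PySem.Int.mod n t = 0 then [PySem.Int.toStr i ++ PySem.Int.toStr (t - i)] else [])
        ++ pvTail n i (t + 1) := by
  unfold pvTail
  rw [PySem.List.pyRange_one_cons (by omega : t < n + 1)]
  rw [List.filter_cons]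
  by_cases hf : PySem.Int.mod n t = 0
  · simp [hf]
  · simp [hf]

theorem pvTail_nil (n i t : Int) (ht : n < t) : pvTail n i t = [] := by
  unfold pvTail
  rw [PySem.List.pyRange_one_eq_nil (by omega)]
  rfl

-- A's inner while loop appends exactly the strings of pvTail n i (i + j)
theorem pvWhileA_eq (n i : Int) : ∀ (k : Nat) (j : Int) (result : String),
    (n + 1 - i - j).toNat = k →
    pvWhileA n i j result = result ++ PySem.Str.join "" (pvTail n i (i + j)) := by
  intro k
  induction k with
  | zero =>
    intro j result hk
    rw [pvWhileA, if_neg (by omega : ¬ (i + j ≤ n))]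
    rw [pvTail_nil n i (i + j) (by omega), pvJoin_nil]
    simp
  | succ k ih =>
    intro j result hk
    rw [pvWhileA, if_pos (by omega : i + j ≤ n)]
    rw [ih (j + 1) _ (by omega)]
    rw [pvTail_step n i (i + j) (by omega), pvJoin_append]
    have hji : i + j - i = j := by ring
    have hjj : i + (j + 1) = i + j + 1 := by ring
    by_cases hf : PySem.Int.mod n (i + j) = 0
    · simp [hf, hjj, hji, pvJoin_cons, pvJoin_nil, String.append_assoc]
    · simp [hf, hjj, pvJoin_nil]

-- filtering an int range from below is a shorter range
theorem pvFilter_lt_range (c : Int) : ∀ (k : Nat) (a b : Int), (b - a).toNat = k → a ≤ c + 1 →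
    (PySem.List.pyRange a b 1).filter (fun s => decide (c < s)) = PySem.List.pyRange (c + 1) b 1 := by
  intro k
  induction k with
  | zero =>
    intro a b hk hac
    rw [PySem.List.pyRange_one_eq_nil (by omega), PySem.List.pyRange_one_eq_nil (by omega)]
    rfl
  | succ k ih =>
    intro a b hk hac
    rw [PySem.List.pyRange_one_cons (by omega : a < b)]
    by_cases hca : a ≤ c
    · rw [List.filter_cons]
      have hd : (decide (c < a)) = false := by simp; omega
      rw [hd]
      simp only [Bool.false_eq_true, if_false]
      exact ih (a + 1) b (by omega) (by omega)
    · -- a = c + 1 : every element of the range satisfies the filter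
      have hace : a = c + 1 := by omega
      subst hace
      rw [← PySem.List.pyRange_one_cons (by omega : c + 1 < b)]
      apply List.filter_eq_self.mpr
      intro x hx
      have := (PySem.List.mem_pyRange_one).mp hx
      simp; omega

-- B's inner foldl over divs produces parts ++ pvTail n i (2 i + 1)
theorem pvInnerB_eq (n i : Int) (hi : 0 <= i) (parts : List String) :
    ((PySem.List.pyRange 1 (n + 1) 1).filter (fun s => PySem.Int.mod n s == 0)).foldl
      (fun parts s =>
        if 2 * i < s then parts ++ [PySem.Int.toStr i ++ PySem.Int.toStr (s - i)] else parts)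
      parts
    = parts ++ pvTail n i (2 * i + 1) := by
  rw [PySem.List.foldl_append_ite (fun s => 2 * i < s)
        (fun s => PySem.Int.toStr i ++ PySem.Int.toStr (s - i))]
  congr 1
  unfold pvTail
  congr 1
  rw [List.filter_comm]
  congr 1
  exact pvFilter_lt_range (2 * i) (n + 1 - 1).toNat 1 (n + 1) rfl (by omega)

-- the two outer loops agree, given the join-of-parts invariant
theorem pvOuter_eq (n : Int) : ∀ (l : List Int), (∀ i ∈ l, 0 ≤ i) → ∀ (parts : List String),
    l.foldl (fun result i => pvWhileA n i (i + 1) result) (PySem.Str.join "" parts)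
    = PySem.Str.join ""
        (l.foldl (fun parts i =>
          ((PySem.List.pyRange 1 (n + 1) 1).filter (fun s => PySem.Int.mod n s == 0)).foldl
            (fun parts s =>
              if 2 * i < s then parts ++ [PySem.Int.toStr i ++ PySem.Int.toStr (s - i)] else parts)
            parts) parts) := by
  intro l
  induction l with
  | nil => intro _ parts; rfl
  | cons i l ih =>
    intro hmem parts
    simp only [List.foldl_cons]
    rw [pvWhileA_eq n i (n + 1 - i - (i + 1)).toNat (i + 1) _ rfl]
    rw [pvInnerB_eq n i (hmem i (List.mem_cons_self)) parts]
    have hidx : i + (i + 1) = 2 * i + 1 := by ring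
    rw [hidx, ← pvJoin_append, ih (fun x hx => hmem x (List.mem_cons_of_mem i hx))]

-- ===== VERDICT (by name: the statement is the Claim_ definition above) =====
theorem gen_passwords_spec : Claim_equal_gen_passwords := by
  intro n _
  unfold Spec_gen_passwords gen_passwords gen_passwords_alt
  have h := pvOuter_eq n (PySem.List.pyRange 1 (PySem.Int.floordiv (n + 1) 2) 1)
    (fun i hi => by have := (PySem.List.mem_pyRange_one).mp hi; omega) []
  rw [pvJoin_nil] at h
  simpa using h
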